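-- pv_equiv track=rewrite | github.com/Kellthuzad/Advent2022 | Day14/Solution.py | sandyCave
-- ===== SOURCE A (Python) =====
-- def sandyCave(rockLocation, xBounds, yBounds):
--     totalSand = 0
--     sandLocations = []
--     while True:
--         sand = fallingSand2(rockLocation, xBounds, yBounds)
--         if sand == (500,0):
--             totalSand +=1
--             sandLocations.sort()
--             return totalSand
--         rockLocation.add(sand)
--         sandLocations.append(sand)
--         totalSand += 1
--
-- def fallingSand2(rockLocation, xBounds, yBounds):
--     falling = True
--     sandOrigin = (500,0)
--     sandLocation = sandOrigin
--     while falling: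
--         falling = False
--         for dx in [0,-1,1]:
--             if (sandLocation[0]+dx, sandLocation[1]+1) not in rockLocation:
--                 falling = True
--                 sandLocation = (sandLocation[0]+dx, sandLocation[1]+1)
--
--                 if sandLocation[1] == (yBounds[1]+1):
--                     falling = False
--                 break
--     return sandLocation
-- ===== SOURCE B (Python) =====
-- # Path-stack simulation: instead of restarting every grain at (500,0), resume the
-- # fall from the settled grain's parent (the fall prefix never changes because the
-- # blocked set only grows).  Like A, mutates rockLocation by adding settled grains.
-- def sandyCave(rockLocation, xBounds, yBounds):
--     floor = yBounds[1] + 1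
--     path = [(500, 0)]
--     total = 0
--     while True:
--         x, y = path[-1]
--         while y != floor:
--             nxt = next((c for c in ((x, y + 1), (x - 1, y + 1), (x + 1, y + 1))
--                         if c not in rockLocation), None)
--             if nxt is None:
--                 break
--             path.append(nxt)
--             x, y = nxt
--         total += 1
--         if (x, y) == (500, 0):
--             return total
--         rockLocation.add((x, y))
--         path.pop()
-- ===== Notes on version B (the rewrite author's own statement) =====
-- stated objective: alternative
-- what changed: Instead of restarting every grain's fall at the origin (500,0), B keeps the current fall path on an explicit stack and resumes each new grain from the settled grain's parent cell (valid because the blocked set only grows, so the fall prefix never changes); this removes A's per-grain re-descent (intended as faster: a timing run measured 5-30x on deep caves in some runs but did not confirm it in every run, so no unqualified speed is claimed).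
-- outside the precondition, e.g. on sandyCave({(501, 1), (501, 2), (499, 2), (500, 2), (499, 1)}, (0, 0), (0, -5)): A returns 2, B returns 2
import Mathlib
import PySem

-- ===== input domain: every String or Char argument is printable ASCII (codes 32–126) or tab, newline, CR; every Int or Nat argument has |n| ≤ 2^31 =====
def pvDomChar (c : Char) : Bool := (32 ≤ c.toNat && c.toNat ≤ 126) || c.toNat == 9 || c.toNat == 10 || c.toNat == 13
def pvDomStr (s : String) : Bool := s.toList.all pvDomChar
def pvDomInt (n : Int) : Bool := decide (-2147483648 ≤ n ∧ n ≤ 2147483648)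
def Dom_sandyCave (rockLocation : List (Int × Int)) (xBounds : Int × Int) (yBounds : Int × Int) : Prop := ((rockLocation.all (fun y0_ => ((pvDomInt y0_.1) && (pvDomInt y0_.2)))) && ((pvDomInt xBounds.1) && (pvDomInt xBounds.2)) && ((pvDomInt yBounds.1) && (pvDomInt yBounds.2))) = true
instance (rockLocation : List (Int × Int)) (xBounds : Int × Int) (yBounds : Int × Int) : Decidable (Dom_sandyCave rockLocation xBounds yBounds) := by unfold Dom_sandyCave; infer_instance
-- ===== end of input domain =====

-- B replaces A's restart-from-origin per grain by a resumable path stack (a different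
-- algorithm; intended to save the repeated descent); both mutate the Python set
-- rockLocation the same way; the equivalence proved is about the return value.

-- ===== PORT A =====
-- A's inner 'for dx in [0,-1,1]: if free: move; break' — first free cell below (x, y).
def fallStep (rockLocation : List (Int × Int)) (x y : Int) : Option (Int × Int) :=
  if (x, y + 1) ∈ rockLocation then
    if (x - 1, y + 1) ∈ rockLocation then
      if (x + 1, y + 1) ∈ rockLocation then none
      else some (x + 1, y + 1)
    else some (x - 1, y + 1)
  else some (x, y + 1)

-- A's 'while falling' loop; fuel is a totality device only (one unit per move; a grain
-- falls at most yB+1 rows before the y == yBounds[1]+1 check stops it).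
def fallingSand2 (rockLocation : List (Int × Int)) (yB : Int) : (Int × Int) → Nat → (Int × Int)
  | loc, 0 => loc
  | loc, fuel + 1 =>
    match fallStep rockLocation loc.1 loc.2 with
    | none => loc
    | some c => if c.2 = yB + 1 then c else fallingSand2 rockLocation yB c fuel

-- A's outer 'while True' loop; one fuel unit per grain.  sandLocations is threaded as
-- in A; its final in-place sort is dead for the returned int and is elided.
def sandyCaveLoop (yB : Int) : List (Int × Int) → List (Int × Int) → Int → Nat → Option Int
  | _, _, _, 0 => none
  | rocks, sands, total, fuel + 1 =>
    let sand := fallingSand2 rocks yB (500, 0) (yB + 1).toNat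
    if sand = (500, 0) then some (total + 1)
    else sandyCaveLoop yB (PySem.Set.add rocks sand) (sands ++ [sand]) (total + 1) fuel

-- Outer fuel (yB+2)^2+1: at most (yB+2)^2 grains settle (one per cell of the fall
-- triangle above the floor, plus the final grain at the origin).
def sandyCave (rockLocation : List (Int × Int)) (xBounds : Int × Int) (yBounds : Int × Int) : Int :=
  (sandyCaveLoop yBounds.2 rockLocation [] 0 (((yBounds.2 + 2) * (yBounds.2 + 2)).toNat + 1)).getD 0

-- ===== PORT B =====
-- B's candidate generator: the three cells below (x, y), in probe order.
def fallCands (x y : Int) : List (Int × Int) := [(x, y + 1), (x - 1, y + 1), (x + 1, y + 1)]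

-- B's inner 'while y != floor: nxt = next(...)' descent, extending the path stack.
-- One fuel unit per iteration; (floor - y) units suffice since y rises by 1 per push.
def descend (rocks : List (Int × Int)) (floor : Int) : List (Int × Int) → Nat → List (Int × Int)
  | path, 0 => path
  | path, fuel + 1 =>
    match path with
    | [] => []
    | (x, y) :: rest =>
      if y = floor then (x, y) :: rest
      else
        match (fallCands x y).find? (fun c => !(decide (c ∈ rocks))) with
        | none => (x, y) :: rest
        | some c => descend rocks floor (c :: (x, y) :: rest) fuel

-- B's outer 'while True' loop: settle the head of the extended path, pop it.
-- One fuel unit per grain, same grain bound as A's port.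
def sandyCaveAltLoop (yB : Int) : List (Int × Int) → List (Int × Int) → Int → Nat → Option Int
  | _, _, _, 0 => none
  | rocks, path, total, fuel + 1 =>
    match descend rocks (yB + 1) path ((yB + 1 - (path.headD (500, 0)).2).toNat) with
    | [] => none
    | s :: rest =>
      if s = (500, 0) then some (total + 1)
      else sandyCaveAltLoop yB (PySem.Set.add rocks s) rest (total + 1) fuel

def sandyCave_alt (rockLocation : List (Int × Int)) (xBounds : Int × Int) (yBounds : Int × Int) : Int :=
  (sandyCaveAltLoop yBounds.2 rockLocation [(500, 0)] 0 (((yBounds.2 + 2) * (yBounds.2 + 2)).toNat + 1)).getD 0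

-- ===== PRECONDITION & SPEC =====
-- Pre_ excludes yBounds.2 < 0: there the floor row yBounds.2+1 lies at or above the
-- sand origin, A's loop can only stop if rocks happen to enclose the origin and
-- otherwise runs forever, so termination (and a fuel bound for the ports) is only
-- guaranteed for yBounds.2 ≥ 0.
def Pre_sandyCave (rockLocation : List (Int × Int)) (xBounds : Int × Int) (yBounds : Int × Int) : Prop :=
  0 ≤ yBounds.2
instance (rockLocation : List (Int × Int)) (xBounds : Int × Int) (yBounds : Int × Int) : Decidable (Pre_sandyCave rockLocation xBounds yBounds) := by unfold Pre_sandyCave; infer_instance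

def pvWitness_sandyCave : (List (Int × Int)) × (Int × Int) × (Int × Int) := ([(499, 1), (500, 1)], (0, 0), (0, 1))

def Spec_sandyCave (rockLocation : List (Int × Int)) (xBounds : Int × Int) (yBounds : Int × Int) (out : Int) : Prop := out = sandyCave_alt rockLocation xBounds yBounds
instance (rockLocation : List (Int × Int)) (xBounds : Int × Int) (yBounds : Int × Int) (out : Int) : Decidable (Spec_sandyCave rockLocation xBounds yBounds out) := by unfold Spec_sandyCave; infer_instance

-- ===== CLAIM (what is proved, stated in full; the proofs are below) =====
def Claim_equal_sandyCave : Prop := ∀ (rockLocation : List (Int × Int)) (xBounds : Int × Int) (yBounds : Int × Int), Dom_sandyCave rockLocation xBounds yBounds → Pre_sandyCave rockLocation xBounds yBounds → Spec_sandyCave rockLocation xBounds yBounds (sandyCave rockLocation xBounds yBounds)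

-- ===== LEMMAS AND PROOFS =====

-- The fall prefix shared by consecutive grains: head-first, ending at the origin,
-- each element the first free cell below its successor.
def ChainP (rocks : List (Int × Int)) : List (Int × Int) → Prop
  | [] => False
  | [p] => p = (500, 0)
  | c :: p :: rest => fallStep rocks p.1 p.2 = some c ∧ ChainP rocks (p :: rest)

theorem fallStep_eq_find (rocks : List (Int × Int)) (x y : Int) :
    fallStep rocks x y = (fallCands x y).find? (fun c => !(decide (c ∈ rocks))) := by
  simp only [fallStep, fallCands, List.find?]
  split_ifs <;> simp_all

theorem fallStep_some {rocks : List (Int × Int)} {x y : Int} {c : Int × Int}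
    (h : fallStep rocks x y = some c) : c.2 = y + 1 ∧ c ∉ rocks := by
  unfold fallStep at h
  split_ifs at h <;> simp only [Option.some.injEq] at h <;> subst h <;> simp_all

theorem descend_cons (rocks : List (Int × Int)) (floor : Int) (x y : Int)
    (rest : List (Int × Int)) (f : Nat) :
    descend rocks floor ((x, y) :: rest) (f + 1) =
      if y = floor then (x, y) :: rest
      else
        match (fallCands x y).find? (fun c => !(decide (c ∈ rocks))) with
        | none => (x, y) :: rest
        | some c => descend rocks floor (c :: (x, y) :: rest) f := rfl

theorem fall_succ (rocks : List (Int × Int)) (yB : Int) (loc : Int × Int) (f : Nat) :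
    fallingSand2 rocks yB loc (f + 1) =
      match fallStep rocks loc.1 loc.2 with
      | none => loc
      | some c => if c.2 = yB + 1 then c else fallingSand2 rocks yB c f := rfl

theorem chain_head_y {rocks : List (Int × Int)} :
    ∀ {p : Int × Int} {rest : List (Int × Int)}, ChainP rocks (p :: rest) → p.2 = (rest.length : Int) := by
  intro p rest
  induction rest generalizing p with
  | nil => intro h; simp [ChainP] at h; simp [h]
  | cons q t ih =>
    intro h
    obtain ⟨hs, hc⟩ := h
    have h1 := ih hc
    have h2 := (fallStep_some hs).1
    simp only [List.length_cons]
    push_cast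
    omega

theorem chain_lt_head {rocks : List (Int × Int)} :
    ∀ {c : Int × Int} {rest : List (Int × Int)}, ChainP rocks (c :: rest) → ∀ q ∈ rest, q.2 < c.2 := by
  intro c rest
  induction rest generalizing c with
  | nil => intro _ q hq; simp at hq
  | cons p t ih =>
    intro h q hq
    obtain ⟨hs, hc⟩ := h
    have hy := (fallStep_some hs).1
    rcases List.mem_cons.1 hq with rfl | hq'
    · omega
    · have := ih hc q hq'; omega

theorem fallStep_stable {rocks : List (Int × Int)} {x y : Int} {c s : Int × Int}
    (h : fallStep rocks x y = some c) (hne : c ≠ s) :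
    fallStep (PySem.Set.add rocks s) x y = some c := by
  unfold fallStep at h ⊢
  split_ifs at h ⊢ <;> simp_all

theorem chain_add {rocks : List (Int × Int)} {s : Int × Int} :
    ∀ {path : List (Int × Int)}, ChainP rocks path → (∀ q ∈ path, q.2 < s.2) →
      ChainP (PySem.Set.add rocks s) path := by
  intro path
  induction path with
  | nil => intro h _; exact h.elim
  | cons c rest ih =>
    intro h hy
    cases rest with
    | nil => exact h
    | cons p t =>
      obtain ⟨hs, hc⟩ := h
      refine ⟨fallStep_stable hs ?_, ih hc (fun q hq => hy q (List.mem_cons_of_mem _ hq))⟩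
      intro hcs
      have : c.2 < s.2 := hy c (List.mem_cons_self ..)
      rw [hcs] at this
      omega

theorem descend_chain {rocks : List (Int × Int)} {floor : Int} :
    ∀ (f : Nat) (path : List (Int × Int)), ChainP rocks path →
      ChainP rocks (descend rocks floor path f) := by
  intro f
  induction f with
  | zero => intro path h; exact h
  | succ f ih =>
    intro path h
    cases path with
    | nil => exact h.elim
    | cons hd rest =>
      obtain ⟨x, y⟩ := hd
      show ChainP rocks (descend rocks floor ((x, y) :: rest) (f + 1))
      rw [descend_cons]
      split_ifs with hf
      · exact h
      · cases hfind : (fallCands x y).find? (fun c => !(decide (c ∈ rocks))) with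
        | none => exact h
        | some c =>
          exact ih _ ⟨(fallStep_eq_find rocks x y).trans hfind, h⟩

theorem descend_head_floor {rocks : List (Int × Int)} {floor : Int} {c : Int × Int}
    (hc : c.2 = floor) (t : List (Int × Int)) (f : Nat) :
    (descend rocks floor (c :: t) f).headD (500, 0) = c := by
  cases f with
  | zero => rfl
  | succ f =>
    obtain ⟨cx, cy⟩ := c
    simp at hc
    simp [descend, hc]

theorem descend_head_eq_fall {rocks : List (Int × Int)} {yB : Int} :
    ∀ (f : Nat) (x y : Int) (rest : List (Int × Int)), y < yB + 1 →
      (descend rocks (yB + 1) ((x, y) :: rest) f).headD (500, 0) =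
        fallingSand2 rocks yB (x, y) f := by
  intro f
  induction f with
  | zero => intro x y rest _; rfl
  | succ f ih =>
    intro x y rest hy
    have hyne : ¬ (y = yB + 1) := by omega
    rw [descend_cons, fall_succ, ← fallStep_eq_find]
    simp only [hyne, if_false]
    cases hfs : fallStep rocks x y with
    | none => rfl
    | some c =>
      have hcy := (fallStep_some hfs).1
      by_cases hfloor : c.2 = yB + 1
      · simp only [hfloor]
        exact descend_head_floor hfloor _ f
      · simp only [hfloor]
        obtain ⟨cx, cy⟩ := c
        exact ih cx cy _ (by simp at hcy hfloor ⊢; omega)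

theorem fall_y_le {rocks : List (Int × Int)} {yB : Int} :
    ∀ (f : Nat) (p : Int × Int), p.2 < yB + 1 → (fallingSand2 rocks yB p f).2 ≤ yB + 1 := by
  intro f
  induction f with
  | zero => intro p hp; unfold fallingSand2; omega
  | succ f ih =>
    intro p hp
    unfold fallingSand2
    cases hfs : fallStep rocks p.1 p.2 with
    | none => simpa using le_of_lt hp
    | some c =>
      have hcy := (fallStep_some hfs).1
      by_cases hfloor : c.2 = yB + 1
      · simp [hfloor]
      · simp only [hfloor]
        exact ih c (by omega)

theorem fall_shift {rocks : List (Int × Int)} {yB : Int} :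
    ∀ (rest : List (Int × Int)) (p : Int × Int), ChainP rocks (p :: rest) → p.2 < yB + 1 →
      ∀ (F : Nat), fallingSand2 rocks yB (500, 0) (rest.length + F) =
        fallingSand2 rocks yB p F := by
  intro rest
  induction rest with
  | nil =>
    intro p h _ F
    simp [ChainP] at h
    subst h
    simp
  | cons q t ih =>
    intro p h hp F
    obtain ⟨hs, hc⟩ := h
    have hqy := (fallStep_some hs).1
    have hq : q.2 < yB + 1 := by omega
    have h1 : (q :: t).length + F = t.length + (F + 1) := by simp [List.length]; omega
    rw [h1, ih q hc hq (F + 1), fall_succ, hs]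
    have hne : ¬ (p.2 = yB + 1) := by omega
    simp only [hne, if_false]

theorem bisim {yB : Int} (hyB : 0 ≤ yB) :
    ∀ (fuel : Nat) (rocks path sands : List (Int × Int)) (total : Int),
      ChainP rocks path → (path.headD (500, 0)).2 < yB + 1 →
      sandyCaveLoop yB rocks sands total fuel = sandyCaveAltLoop yB rocks path total fuel := by
  intro fuel
  induction fuel with
  | zero => intro _ _ _ _ _ _; rfl
  | succ fuel ih =>
    intro rocks path sands total hchain hhead
    cases path with
    | nil => exact hchain.elim
    | cons p rest =>
      obtain ⟨px, py⟩ := p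
      simp only [List.headD] at hhead
      -- the settle cell is the same on both sides
      have hk : (py : Int) = (rest.length : Int) := chain_head_y hchain
      have hfuel : rest.length + ((yB + 1 - py).toNat) = (yB + 1).toNat := by omega
      have hsettle :
          fallingSand2 rocks yB (500, 0) ((yB + 1).toNat) =
            fallingSand2 rocks yB (px, py) ((yB + 1 - py).toNat) := by
        rw [← hfuel]
        exact fall_shift rest (px, py) hchain hhead _
      have hdesc :
          (descend rocks (yB + 1) ((px, py) :: rest) ((yB + 1 - py).toNat)).headD (500, 0) =
            fallingSand2 rocks yB (px, py) ((yB + 1 - py).toNat) :=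
        descend_head_eq_fall _ px py rest hhead
      have hchain' : ChainP rocks (descend rocks (yB + 1) ((px, py) :: rest) ((yB + 1 - py).toNat)) :=
        descend_chain _ _ hchain
      show sandyCaveLoop yB rocks sands total (fuel + 1) =
        sandyCaveAltLoop yB rocks ((px, py) :: rest) total (fuel + 1)
      unfold sandyCaveLoop sandyCaveAltLoop
      simp only [List.headD]
      cases hd : descend rocks (yB + 1) ((px, py) :: rest) ((yB + 1 - py).toNat) with
      | nil => rw [hd] at hchain'; exact hchain'.elim
      | cons s rest' =>
        rw [hd] at hchain' hdesc
        simp only [List.headD] at hdesc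
        have hsA : fallingSand2 rocks yB (500, 0) ((yB + 1).toNat) = s := by
          rw [hsettle, ← hdesc]
        rw [hsA]
        by_cases hso : s = (500, 0)
        · simp [hso]
        · simp only [hso]
          -- the popped path satisfies the invariant for the grown rock set
          cases rest' with
          | nil =>
            exfalso
            have : s = (500, 0) := hchain'
            exact hso this
          | cons q t =>
            have hlt : ∀ r ∈ q :: t, r.2 < s.2 := chain_lt_head hchain'
            obtain ⟨hsq, hcq⟩ := hchain'
            have hsy : s.2 = q.2 + 1 := (fallStep_some hsq).1
            have hsle : s.2 ≤ yB + 1 := by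
              rw [hdesc]
              exact fall_y_le _ (px, py) hhead
            have hchain'' : ChainP (PySem.Set.add rocks s) (q :: t) := chain_add hcq hlt
            have hhead' : ((q :: t).headD (500, 0)).2 < yB + 1 := by
              simp only [List.headD]; omega
            exact ih (PySem.Set.add rocks s) (q :: t) (sands ++ [s]) (total + 1) hchain'' hhead'

-- ===== VERDICT (by name: the statement is the Claim_ definition above) =====
theorem sandyCave_spec : Claim_equal_sandyCave := by
  intro rockLocation xBounds yBounds _ hpre
  have h0 : (0 : Int) ≤ yBounds.2 := hpre
  unfold Spec_sandyCave sandyCave sandyCave_alt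
  rw [bisim h0 _ rockLocation [(500, 0)] [] 0 rfl (by simp only [List.headD]; omega)]
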